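-- pv_equiv track=rewrite | github.com/CastCris/College | battle_ship/warship.py | get_ships_positions
-- ===== SOURCE A (Python) =====
-- BLOCK_IGNORE='0'
--
-- def get_ships_names(table:'matrix')->'list':
--     ships_name=[]
--     for i in table:
--         for j in i:
--             if not j in ships_name and j!=BLOCK_IGNORE:
--                 ships_name.append(j)
--     return ships_name
--
-- def get_ships_positions(table:'matrix')->'dict':
--     ships_name=get_ships_names(table)
--     position_by_name={}
--     for i in ships_name:
--         position_by_name[i]=[[],[]] # line,column
--     #
--     for i in range(len(table)):
--         for j in range(len(table[i])):
--             content=table[i][j]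
--             if not content in ships_name:
--                 continue
--             position_by_name[content][0].append(i)
--             position_by_name[content][1].append(j)
--     return position_by_name
-- ===== SOURCE B (Python) =====
-- def get_ships_positions(table):
--     coords = {}
--     for i, row in enumerate(table):
--         for j, cell in enumerate(row):
--             if cell != '0':
--                 coords.setdefault(cell, []).append((i, j))
--     return {name: [[p[0] for p in ps], [p[1] for p in ps]]
--             for name, ps in coords.items()}
-- ===== Notes on version B (the rewrite author's own statement) =====
-- stated objective: faster
-- what changed: B drops A's name-collecting pre-pass and per-cell 'content in ships_name' list scans: one row-major pass groups (row, col) pairs into a dict keyed by label via setdefault, then a second pass over the dict transposes each group into the [rows, cols] lists.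
import Mathlib
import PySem

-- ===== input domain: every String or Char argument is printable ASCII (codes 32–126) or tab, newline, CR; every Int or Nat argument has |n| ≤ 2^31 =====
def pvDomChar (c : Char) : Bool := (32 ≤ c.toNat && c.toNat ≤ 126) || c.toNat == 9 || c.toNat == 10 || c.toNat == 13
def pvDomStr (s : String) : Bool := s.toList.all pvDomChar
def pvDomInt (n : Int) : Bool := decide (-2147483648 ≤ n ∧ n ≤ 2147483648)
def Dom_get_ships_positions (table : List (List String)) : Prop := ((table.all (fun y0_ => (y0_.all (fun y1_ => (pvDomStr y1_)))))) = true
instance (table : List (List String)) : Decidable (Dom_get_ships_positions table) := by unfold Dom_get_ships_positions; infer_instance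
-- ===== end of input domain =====

-- B replaces A's name-collecting pre-pass and per-cell list-membership scans by one
-- grouping pass into a dict of (row, col) pairs followed by a transpose of each group
-- (objective: faster — O(n) instead of A's O(n*k) per-cell list scans; A mutates nothing).

-- ===== PORT A =====
-- literal port of get_ships_names
def pvShipsNames (table : List (List String)) : List String :=
  table.foldl (fun acc i =>
    i.foldl (fun acc j =>
      if j ∉ acc ∧ j ≠ "0" then acc ++ [j] else acc) acc) []

def get_ships_positions (table : List (List String)) : List (String × List (List Int)) :=
  let ships_name := pvShipsNames table
  let position_by_name : PySem.Dict String (List (List Int)) :=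
    ships_name.foldl (fun d i => d.insert i [[], []]) PySem.Dict.empty
  let final :=
    (PySem.List.pyRange 0 (PySem.List.len table) 1).foldl (fun d i =>
      (PySem.List.pyRange 0 (PySem.List.len (PySem.List.pyGetD table i [])) 1).foldl (fun d j =>
        let content := PySem.List.pyGetD (PySem.List.pyGetD table i []) j ""
        if content ∈ ships_name then
          -- the two in-place .append calls on position_by_name[content], ported as a functional update
          let v := d.getD content [[], []]
          d.insert content [v.getD 0 [] ++ [i], v.getD 1 [] ++ [j]]
        else d) d) position_by_name
  final.items

-- ===== PORT B =====
def get_ships_positions_alt (table : List (List String)) : List (String × List (List Int)) :=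
  let coords : PySem.Dict String (List (Int × Int)) :=
    (PySem.List.enumerate table 0).foldl (fun d p =>
      (PySem.List.enumerate p.2 0).foldl (fun d q =>
        if q.2 ≠ "0" then d.modify q.2 [] (· ++ [(p.1, q.1)]) else d) d) PySem.Dict.empty
  coords.items.map (fun p => (p.1, [p.2.map (·.1), p.2.map (·.2)]))

-- ===== PRECONDITION & SPEC =====
def Spec_get_ships_positions (table : List (List String)) (out : List (String × List (List Int))) : Prop := out = get_ships_positions_alt table
instance (table : List (List String)) (out : List (String × List (List Int))) : Decidable (Spec_get_ships_positions table out) := by unfold Spec_get_ships_positions; infer_instance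

-- ===== CLAIM (what is proved, stated in full; the proofs are below) =====
def Claim_equal_get_ships_positions : Prop := ∀ (table : List (List String)), Dom_get_ships_positions table → Spec_get_ships_positions table (get_ships_positions table)

-- ===== LEMMAS AND PROOFS =====

-- row-major flat list of cells (row index, column index, label)
def pvCells (table : List (List String)) : List (Int × Int × String) :=
  (PySem.List.enumerate table 0).flatMap (fun p =>
    (PySem.List.enumerate p.2 0).map (fun q => (p.1, q.1, q.2)))

def pvStepA (names : List String) (d : PySem.Dict String (List (List Int)))
    (c : Int × Int × String) : PySem.Dict String (List (List Int)) :=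
  if c.2.2 ∈ names then
    let v := d.getD c.2.2 [[], []]
    d.insert c.2.2 [v.getD 0 [] ++ [c.1], v.getD 1 [] ++ [c.2.1]]
  else d

def pvStepB (d : PySem.Dict String (List (Int × Int)))
    (c : Int × Int × String) : PySem.Dict String (List (Int × Int)) :=
  if c.2.2 ≠ "0" then d.modify c.2.2 [] (· ++ [(c.1, c.2.1)]) else d

lemma pvNames_foldl (l : List String) (acc : List String) :
    l.foldl (fun acc j => if j ∉ acc ∧ j ≠ "0" then acc ++ [j] else acc) acc
      = PySem.Set.update acc (l.filter (· != "0")) := by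
  induction l generalizing acc with
  | nil => rfl
  | cons x xs ih =>
    by_cases hx : x = "0"
    · subst hx
      simp [ih]
    · by_cases hm : x ∈ acc <;>
        simp [hx, hm, ih, PySem.Set.update_cons, PySem.Set.add]

lemma pvShipsNames_eq (table : List (List String)) :
    pvShipsNames table = PySem.Set.ofList (table.flatten.filter (· != "0")) := by
  unfold pvShipsNames
  rw [← List.foldl_flatten]
  rw [pvNames_foldl]
  rw [← PySem.Set.update_nil_left]

lemma pvCells_map_snd (table : List (List String)) (s : Int) :
    ((PySem.List.enumerate table s).flatMap (fun p =>
      (PySem.List.enumerate p.2 0).map (fun q => (p.1, q.1, q.2)))).map (·.2.2)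
      = table.flatten := by
  induction table generalizing s with
  | nil => rfl
  | cons row rows ih =>
    simp only [PySem.List.enumerate_cons, List.flatMap_cons, List.map_append,
      List.flatten_cons, ih, List.map_map]
    congr 1
    simp [Function.comp_def]

-- A's nested index loop is the fold of pvStepA over pvCells
lemma pvA_fold (table : List (List String)) (names : List String)
    (d : PySem.Dict String (List (List Int))) :
    (PySem.List.pyRange 0 (PySem.List.len table) 1).foldl (fun d i =>
      (PySem.List.pyRange 0 (PySem.List.len (PySem.List.pyGetD table i [])) 1).foldl (fun d j =>
        let content := PySem.List.pyGetD (PySem.List.pyGetD table i []) j ""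
        if content ∈ names then
          let v := d.getD content [[], []]
          d.insert content [v.getD 0 [] ++ [i], v.getD 1 [] ++ [j]]
        else d) d) d
      = (pvCells table).foldl (pvStepA names) d := by
  unfold pvCells
  rw [List.foldl_flatMap]
  rw [PySem.List.enumerate_eq_map_pyRange table ([] : List String), List.foldl_map]
  refine PySem.List.foldl_congr_mem _ _ _ _ (fun d' i _ => ?_)
  rw [PySem.List.enumerate_eq_map_pyRange (PySem.List.pyGetD table i []) ("" : String),
    List.foldl_map, List.foldl_map]
  rfl

-- B's nested enumerate loop is the fold of pvStepB over pvCells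
lemma pvB_fold (table : List (List String)) (d : PySem.Dict String (List (Int × Int))) :
    (PySem.List.enumerate table 0).foldl (fun d p =>
      (PySem.List.enumerate p.2 0).foldl (fun d q =>
        if q.2 ≠ "0" then d.modify q.2 [] (· ++ [(p.1, q.1)]) else d) d) d
      = (pvCells table).foldl pvStepB d := by
  unfold pvCells
  rw [List.foldl_flatMap]
  refine PySem.List.foldl_congr_mem _ _ _ _ (fun d' p _ => ?_)
  rw [List.foldl_map]
  rfl

-- the core invariant: A's dict stays the transpose of B's dict, keyed identically
lemma pvMain (names : List String) (cs : List (Int × Int × String))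
    (dA : PySem.Dict String (List (List Int))) (dB : PySem.Dict String (List (Int × Int)))
    (hmem : ∀ c ∈ cs, (c.2.2 ∈ names ↔ c.2.2 ≠ "0"))
    (hkeys : dA.keys = names)
    (hval : ∀ k, dA.getD k [[], []]
      = [(dB.getD k []).map (·.1), (dB.getD k []).map (·.2)]) :
    (cs.foldl (pvStepA names) dA).keys = names ∧
    ∀ k, (cs.foldl (pvStepA names) dA).getD k [[], []]
      = [((cs.foldl pvStepB dB).getD k []).map (·.1),
         ((cs.foldl pvStepB dB).getD k []).map (·.2)] := by
  induction cs generalizing dA dB with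
  | nil => exact ⟨hkeys, hval⟩
  | cons c cs ih =>
    simp only [List.foldl_cons]
    by_cases h0 : c.2.2 = "0"
    · have hnm : c.2.2 ∉ names := by
        intro hin
        exact ((hmem c (List.mem_cons_self ..)).1 hin) h0
      rw [show pvStepA names dA c = dA by simp [pvStepA, hnm],
          show pvStepB dB c = dB by simp [pvStepB, h0]]
      exact ih dA dB (fun c hc => hmem c (List.mem_cons_of_mem _ hc)) hkeys hval
    · have hnm : c.2.2 ∈ names := (hmem c (List.mem_cons_self ..)).2 h0
      rw [show pvStepA names dA c
            = dA.insert c.2.2 [(dB.getD c.2.2 []).map (·.1) ++ [c.1],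
                               (dB.getD c.2.2 []).map (·.2) ++ [c.2.1]] by
            simp [pvStepA, hnm, hval c.2.2],
          show pvStepB dB c = dB.modify c.2.2 [] (· ++ [(c.1, c.2.1)]) by
            simp [pvStepB, h0]]
      refine ih _ _ (fun c hc => hmem c (List.mem_cons_of_mem _ hc)) ?_ ?_
      · rw [PySem.Dict.keys_insert_of_contains]
        · exact hkeys
        · rw [PySem.Dict.contains_iff_mem_keys, hkeys]; exact hnm
      · intro k
        rw [PySem.Dict.getD_insert, PySem.Dict.getD_modify]
        by_cases hk : k = c.2.2
        · simp [hk, List.map_append]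
        · simp [hk, hval k]

-- the initialisation dict of A: every name maps to [[],[]]
lemma pvInit_items (names : List String) (hnd : names.Nodup) :
    (names.foldl (fun d i => d.insert i ([[], []] : List (List Int))) PySem.Dict.empty).items
      = names.map (fun k => (k, ([[], []] : List (List Int)))) := by
  have := PySem.Dict.items_foldl_insert_fresh (l := names) (k := id)
    (v := fun _ => ([[], []] : List (List Int))) (d := PySem.Dict.empty)
    (by intro a _; exact PySem.Dict.contains_empty a) (by simpa using hnd)
  simpa using this

lemma pvInit_keys (names : List String) (hnd : names.Nodup) :
    (names.foldl (fun d i => d.insert i ([[], []] : List (List Int))) PySem.Dict.empty).keys = names := by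
  simp [PySem.Dict.keys, pvInit_items names hnd, Function.comp_def]

lemma pvInit_getD (names : List String) (hnd : names.Nodup) (k : String) :
    (names.foldl (fun d i => d.insert i ([[], []] : List (List Int))) PySem.Dict.empty).getD k [[], []]
      = [[], []] := by
  by_cases hk : k ∈ names
  · refine PySem.Dict.getD_of_mem_items _ ?_ ?_ _
    · rw [pvInit_items names hnd]
      exact List.mem_map.2 ⟨k, hk, rfl⟩
    · rw [pvInit_keys names hnd]; exact hnd
  · refine PySem.Dict.getD_of_not_contains _ _ ?_
    rw [PySem.Dict.contains_eq_decide_mem_keys, pvInit_keys names hnd]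
    simpa using hk

lemma pvB_keys (table : List (List String)) :
    ((pvCells table).foldl pvStepB PySem.Dict.empty).keys
      = PySem.Set.ofList (table.flatten.filter (· != "0")) := by
  have hf : (pvCells table).foldl pvStepB PySem.Dict.empty
      = ((pvCells table).filter (fun c => c.2.2 != "0")).foldl
          (fun d c => d.modify c.2.2 [] (· ++ [(c.1, c.2.1)])) PySem.Dict.empty := by
    rw [List.foldl_filter]
    refine PySem.List.foldl_congr_mem _ _ _ _ (fun d c _ => ?_)
    by_cases h : c.2.2 = "0" <;> simp [pvStepB, h]
  rw [hf, PySem.Dict.keys_foldl_modify_key]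
  have hm : ((pvCells table).filter (fun c => c.2.2 != "0")).map (·.2.2)
      = table.flatten.filter (· != "0") := by
    rw [← pvCells_map_snd table 0, List.filter_map]
    rfl
  simp [hm, PySem.Set.update_nil_left]

lemma pvB_nodup_keys (table : List (List String)) :
    ((pvCells table).foldl pvStepB PySem.Dict.empty).keys.Nodup := by
  rw [pvB_keys]
  exact PySem.Set.nodup_ofList _

-- ===== VERDICT (by name: the statement is the Claim_ definition above) =====
theorem get_ships_positions_spec : Claim_equal_get_ships_positions := by
  intro table _
  unfold Spec_get_ships_positions
  simp only [get_ships_positions, get_ships_positions_alt]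
  set names := pvShipsNames table with hnames
  have hnset : names = PySem.Set.ofList (table.flatten.filter (· != "0")) :=
    pvShipsNames_eq table
  have hnd : names.Nodup := by rw [hnset]; exact PySem.Set.nodup_ofList _
  rw [pvA_fold table names, pvB_fold table]
  have hmem : ∀ c ∈ pvCells table, (c.2.2 ∈ names ↔ c.2.2 ≠ "0") := by
    intro c hc
    have hfl : c.2.2 ∈ table.flatten := by
      rw [← pvCells_map_snd table 0]
      exact List.mem_map.2 ⟨c, hc, rfl⟩
    rw [hnset]
    constructor
    · intro h
      have := (PySem.Set.mem_ofList _ _).1 h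
      simp only [List.mem_filter] at this
      simpa using this.2
    · intro h
      refine (PySem.Set.mem_ofList _ _).2 ?_
      simp only [List.mem_filter]
      exact ⟨hfl, by simpa using h⟩
  obtain ⟨hkeys, hval⟩ := pvMain names (pvCells table)
    (names.foldl (fun d i => d.insert i ([[], []] : List (List Int))) PySem.Dict.empty)
    PySem.Dict.empty hmem (pvInit_keys names hnd)
    (fun k => by rw [pvInit_getD names hnd k]; simp)
  -- rewrite both sides through items_eq_map_keys
  rw [PySem.Dict.items_eq_map_keys _ (by rw [hkeys]; exact hnd) [[], []],
      PySem.Dict.items_eq_map_keys _ (pvB_nodup_keys table) []]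
  rw [hkeys, pvB_keys table, ← hnset, List.map_map]
  refine List.map_congr_left (fun k _ => ?_)
  simp [hval k]
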